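-- pv_equiv track=rewrite | github.com/TheGringo-ai/ElGringo | ai_dev_team/intelligence/cmms_schemas.py | identify_vendor
-- ===== SOURCE A (Python) =====
-- from typing import Dict, List, Set
--
-- def identify_vendor(columns: List[str]) -> str:
--     """
--     Attempt to identify the CMMS vendor based on column names.
--
--     Args:
--         columns: List of column names from CSV
--
--     Returns:
--         Vendor name or "Unknown"
--     """
--     columns_lower = [c.lower() for c in columns]
--
--     # Check for vendor-specific signatures
--     vendor_signatures = {
--         "IBM Maximo": ["wonum", "assetnum", "actlabhrs", "pmnum", "jpnum"],
--         "SAP PM": ["aufnr", "equnr", "tplnr", "iwerk", "erdat"],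
--         "UpKeep": ["workorderno", "datecompleted", "createdat", "assetid"],
--         "Fiix": ["strcode", "strdescription", "intassetid", "dbltotalcost"],
--         "ServiceChannel": ["locationid", "providerid", "nte", "calldate"],
--         "Limble": ["taskid", "taskname", "taskstatus", "taskpriority"],
--         "eMaint": ["wo_number", "equipment_id", "date_opened", "equip_id"],
--         "Hippo": ["workordernumber", "workorderstatus", "workorderpriority"],
--         "MPulse": ["wonumber", "equipmentid", "assignedtech", "opendate"],
--         "Brightly": ["requestid", "requestnumber", "requeststatus", "buildingid"],
--         "Infor EAM": ["workordernum", "equipmentdesc", "targetdate"],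
--     }
--
--     for vendor, signatures in vendor_signatures.items():
--         matches = sum(1 for sig in signatures if sig in columns_lower)
--         if matches >= 2:  # At least 2 signature fields
--             return vendor
--
--     return "Unknown"
-- ===== SOURCE B (Python) =====
-- VENDOR_SIGNATURES = {
--     "IBM Maximo": ["wonum", "assetnum", "actlabhrs", "pmnum", "jpnum"],
--     "SAP PM": ["aufnr", "equnr", "tplnr", "iwerk", "erdat"],
--     "UpKeep": ["workorderno", "datecompleted", "createdat", "assetid"],
--     "Fiix": ["strcode", "strdescription", "intassetid", "dbltotalcost"],
--     "ServiceChannel": ["locationid", "providerid", "nte", "calldate"],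
--     "Limble": ["taskid", "taskname", "taskstatus", "taskpriority"],
--     "eMaint": ["wo_number", "equipment_id", "date_opened", "equip_id"],
--     "Hippo": ["workordernumber", "workorderstatus", "workorderpriority"],
--     "MPulse": ["wonumber", "equipmentid", "assignedtech", "opendate"],
--     "Brightly": ["requestid", "requestnumber", "requeststatus", "buildingid"],
--     "Infor EAM": ["workordernum", "equipmentdesc", "targetdate"],
-- }
--
-- # Inverted index: signature column name -> vendor (signatures are unique across vendors).
-- SIG_TO_VENDOR = {sig: vendor for vendor, sigs in VENDOR_SIGNATURES.items() for sig in sigs}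
--
--
-- def identify_vendor(columns):
--     counts = {}
--     for col in set(c.lower() for c in columns):
--         vendor = SIG_TO_VENDOR.get(col)
--         if vendor is not None:
--             counts[vendor] = counts.get(vendor, 0) + 1
--     for vendor in VENDOR_SIGNATURES:
--         if counts.get(vendor, 0) >= 2:
--             return vendor
--     return "Unknown"
-- ===== Notes on version B (the rewrite author's own statement) =====
-- stated objective: faster
-- what changed: Replaces A's per-vendor scan that counts each of the 44 signatures in the column list with a single counting pass: an inverted signature-to-vendor dict is built once, the distinct lowercased columns are looked up in it to accumulate per-vendor counts, and the first vendor (in table order) with count >= 2 is returned.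
import Mathlib
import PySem

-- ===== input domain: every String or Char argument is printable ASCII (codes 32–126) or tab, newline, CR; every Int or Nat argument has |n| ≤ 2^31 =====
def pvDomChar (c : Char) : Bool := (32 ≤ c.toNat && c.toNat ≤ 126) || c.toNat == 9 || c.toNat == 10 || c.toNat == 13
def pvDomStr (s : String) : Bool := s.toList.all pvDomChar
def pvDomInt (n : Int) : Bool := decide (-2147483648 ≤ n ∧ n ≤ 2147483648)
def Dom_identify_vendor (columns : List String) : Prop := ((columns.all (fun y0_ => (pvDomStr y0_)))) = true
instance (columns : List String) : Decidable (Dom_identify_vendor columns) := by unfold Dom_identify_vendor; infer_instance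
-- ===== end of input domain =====

-- B replaces A's per-vendor scan of the column list by one counting pass over the distinct
-- lowercased columns through an inverted signature→vendor index (objective: faster, measured).

-- ===== PORT A =====
-- the vendor_signatures dict of A (and of B), in insertion order
def pvTable : List (String × List String) := [
  ("IBM Maximo", ["wonum", "assetnum", "actlabhrs", "pmnum", "jpnum"]),
  ("SAP PM", ["aufnr", "equnr", "tplnr", "iwerk", "erdat"]),
  ("UpKeep", ["workorderno", "datecompleted", "createdat", "assetid"]),
  ("Fiix", ["strcode", "strdescription", "intassetid", "dbltotalcost"]),
  ("ServiceChannel", ["locationid", "providerid", "nte", "calldate"]),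
  ("Limble", ["taskid", "taskname", "taskstatus", "taskpriority"]),
  ("eMaint", ["wo_number", "equipment_id", "date_opened", "equip_id"]),
  ("Hippo", ["workordernumber", "workorderstatus", "workorderpriority"]),
  ("MPulse", ["wonumber", "equipmentid", "assignedtech", "opendate"]),
  ("Brightly", ["requestid", "requestnumber", "requeststatus", "buildingid"]),
  ("Infor EAM", ["workordernum", "equipmentdesc", "targetdate"])]

-- matches = sum(1 for sig in signatures if sig in columns_lower)
def pvMatchesA (signatures : List String) (columnsLower : List String) : Int :=
  ((signatures.filter (fun sig => columnsLower.contains sig)).map (fun _ => (1 : Int))).sum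

-- the 'for vendor, signatures in vendor_signatures.items(): … return vendor' loop
def pvLoopA : List (String × List String) → List String → String
  | [], _ => "Unknown"
  | (vendor, signatures) :: rest, columnsLower =>
      if 2 ≤ pvMatchesA signatures columnsLower then vendor else pvLoopA rest columnsLower

def identify_vendor (columns : List String) : String :=
  pvLoopA pvTable (columns.map PySem.Str.lower)

-- ===== PORT B =====
-- SIG_TO_VENDOR = {sig: vendor for vendor, sigs in VENDOR_SIGNATURES.items() for sig in sigs}
def pvSigToVendor : PySem.Dict String String :=
  pvTable.foldl (fun d p => p.2.foldl (fun d sig => d.insert sig p.1) d) PySem.Dict.empty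

-- the counting loop over set(c.lower() for c in columns)
def pvCounts (columns : List String) : PySem.Dict String Int :=
  (PySem.Set.ofList (columns.map PySem.Str.lower)).foldl
    (fun counts col =>
      match PySem.Dict.get? pvSigToVendor col with
      | some vendor => counts.modify vendor 0 (· + 1)
      | none => counts)
    PySem.Dict.empty

-- 'for vendor in VENDOR_SIGNATURES: if counts.get(vendor, 0) >= 2: return vendor'
def pvLoopB : List (String × List String) → PySem.Dict String Int → String
  | [], _ => "Unknown"
  | (vendor, _) :: rest, counts =>
      if 2 ≤ counts.getD vendor 0 then vendor else pvLoopB rest counts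

def identify_vendor_alt (columns : List String) : String :=
  pvLoopB pvTable (pvCounts columns)

-- ===== PRECONDITION & SPEC =====
def Spec_identify_vendor (columns : List String) (out : String) : Prop := out = identify_vendor_alt columns
instance (columns : List String) (out : String) : Decidable (Spec_identify_vendor columns out) := by unfold Spec_identify_vendor; infer_instance

-- ===== CLAIM (what is proved, stated in full; the proofs are below) =====
def Claim_equal_identify_vendor : Prop := ∀ (columns : List String), Dom_identify_vendor columns → Spec_identify_vendor columns (identify_vendor columns)

-- ===== LEMMAS AND PROOFS =====

-- a fold that dispatches on 'f x' is the fold over the filterMap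
theorem foldl_match_filterMap (f : String → Option String) (l : List String)
    (d : PySem.Dict String Int) :
    l.foldl (fun counts col =>
      match f col with
      | some vendor => counts.modify vendor 0 (· + 1)
      | none => counts) d
    = (l.filterMap f).foldl (fun counts vendor => counts.modify vendor 0 (· + 1)) d := by
  induction l generalizing d with
  | nil => rfl
  | cons c l ih =>
      simp only [List.foldl_cons, List.filterMap_cons]
      cases f c <;> simp [ih]

-- two duplicate-free lists see each other with the same count of common elements
theorem countP_contains_comm (l₁ l₂ : List String) (h₁ : l₁.Nodup) (h₂ : l₂.Nodup) :
    l₁.countP (fun c => l₂.contains c) = l₂.countP (fun c => l₁.contains c) := by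
  rw [List.countP_eq_length_filter, List.countP_eq_length_filter]
  apply List.Perm.length_eq
  apply (List.perm_ext_iff_of_nodup (h₁.filter _) (h₂.filter _)).mpr
  intro a
  simp [List.mem_filter, and_comm]

-- the inverted index hits vendor exactly on vendor's signature columns
set_option maxRecDepth 8192 in
theorem nodup_keys_sigToVendor : pvSigToVendor.keys.Nodup := by decide

theorem items_sigToVendor : pvSigToVendor.items = [("wonum", "IBM Maximo"),
  ("assetnum", "IBM Maximo"), ("actlabhrs", "IBM Maximo"), ("pmnum", "IBM Maximo"),
  ("jpnum", "IBM Maximo"), ("aufnr", "SAP PM"), ("equnr", "SAP PM"), ("tplnr", "SAP PM"),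
  ("iwerk", "SAP PM"), ("erdat", "SAP PM"), ("workorderno", "UpKeep"),
  ("datecompleted", "UpKeep"), ("createdat", "UpKeep"), ("assetid", "UpKeep"),
  ("strcode", "Fiix"), ("strdescription", "Fiix"), ("intassetid", "Fiix"),
  ("dbltotalcost", "Fiix"), ("locationid", "ServiceChannel"), ("providerid", "ServiceChannel"),
  ("nte", "ServiceChannel"), ("calldate", "ServiceChannel"), ("taskid", "Limble"),
  ("taskname", "Limble"), ("taskstatus", "Limble"), ("taskpriority", "Limble"),
  ("wo_number", "eMaint"), ("equipment_id", "eMaint"), ("date_opened", "eMaint"),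
  ("equip_id", "eMaint"), ("workordernumber", "Hippo"), ("workorderstatus", "Hippo"),
  ("workorderpriority", "Hippo"), ("wonumber", "MPulse"), ("equipmentid", "MPulse"),
  ("assignedtech", "MPulse"), ("opendate", "MPulse"), ("requestid", "Brightly"),
  ("requestnumber", "Brightly"), ("requeststatus", "Brightly"), ("buildingid", "Brightly"),
  ("workordernum", "Infor EAM"), ("equipmentdesc", "Infor EAM"), ("targetdate", "Infor EAM")] := by
  set_option maxRecDepth 8192 in decide

theorem get?_sigToVendor (vendor : String) (signatures : List String)
    (h : (vendor, signatures) ∈ pvTable) (c : String) :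
    (PySem.Dict.get? pvSigToVendor c == some vendor) = signatures.contains c := by
  rw [Bool.eq_iff_iff, beq_iff_eq,
    PySem.Dict.get?_eq_some_iff_mem_items pvSigToVendor c vendor nodup_keys_sigToVendor,
    items_sigToVendor]
  set_option maxRecDepth 8192 in
  simp only [pvTable, List.mem_cons, Prod.mk.injEq, List.not_mem_nil, or_false] at h
  rcases h with ⟨rfl, rfl⟩ | ⟨rfl, rfl⟩ | ⟨rfl, rfl⟩ | ⟨rfl, rfl⟩ | ⟨rfl, rfl⟩ | ⟨rfl, rfl⟩ |
    ⟨rfl, rfl⟩ | ⟨rfl, rfl⟩ | ⟨rfl, rfl⟩ | ⟨rfl, rfl⟩ | ⟨rfl, rfl⟩ <;>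
    simp [List.contains_eq_mem, Prod.mk.injEq]

-- B's count for each listed vendor is A's match count
theorem counts_eq_matches (columns : List String) (vendor : String) (signatures : List String)
    (h : (vendor, signatures) ∈ pvTable) :
    (pvCounts columns).getD vendor 0 = pvMatchesA signatures (columns.map PySem.Str.lower) := by
  have hs : signatures.Nodup := by
    have hall : ∀ p ∈ pvTable, p.2.Nodup := by decide
    exact hall _ h
  have hcount : (PySem.Set.ofList (columns.map PySem.Str.lower)).countP
        (fun c => PySem.Dict.get? pvSigToVendor c == some vendor)
      = signatures.countP (fun sig => (columns.map PySem.Str.lower).contains sig) := by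
    rw [List.countP_congr (q := fun c => signatures.contains c)
          (fun c _ => by rw [get?_sigToVendor vendor signatures h c]),
        countP_contains_comm _ _ (PySem.Set.nodup_ofList (columns.map PySem.Str.lower)) hs]
    exact List.countP_congr
      (fun s _ => by simp [List.contains_eq_mem, PySem.Set.mem_ofList])
  unfold pvCounts
  rw [foldl_match_filterMap, PySem.Dict.getD_foldl_modify_add_one, PySem.Dict.getD_empty,
    zero_add, List.count_filterMap, hcount]
  simp [pvMatchesA, List.countP_eq_length_filter]

-- the two selection loops agree on any suffix of the table
theorem loops_eq (columns : List String) (t : List (String × List String))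
    (hsub : ∀ p ∈ t, p ∈ pvTable) :
    pvLoopA t (columns.map PySem.Str.lower) = pvLoopB t (pvCounts columns) := by
  induction t with
  | nil => rfl
  | cons p rest ih =>
      obtain ⟨v, S⟩ := p
      simp only [pvLoopA, pvLoopB]
      rw [counts_eq_matches columns v S (hsub _ (List.mem_cons_self))]
      split_ifs with hcond
      · rfl
      · exact ih (fun q hq => hsub q (List.mem_cons_of_mem _ hq))

-- ===== VERDICT (by name: the statement is the Claim_ definition above) =====
theorem identify_vendor_spec : Claim_equal_identify_vendor := by
  intro columns _
  unfold Spec_identify_vendor identify_vendor identify_vendor_alt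
  exact loops_eq columns pvTable (fun p hp => hp)
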